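-- pv_equiv track=rewrite | github.com/DougSalt/ABM-metadata | lib/ssrepi.py | remove_orphans
-- ===== SOURCE A (Python) =====
-- def remove_orphans(nodes, edges):
--     remaining_nodes = nodes.copy()
--     result = nodes.copy()
--     for edge in edges:
--         if edge[0] in remaining_nodes:
--             del remaining_nodes[edge[0]]
--         if edge[1] in remaining_nodes:
--             del remaining_nodes[edge[1]]
--     for orphan in remaining_nodes:
--         del result[orphan]
--     return result
-- ===== SOURCE B (Python) =====
-- def remove_orphans(nodes, edges):
--     referenced = set()
--     for edge in edges:
--         referenced.add(edge[0])
--         referenced.add(edge[1])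
--     return {k: v for k, v in nodes.items() if k in referenced}
-- ===== Notes on version B (the rewrite author's own statement) =====
-- stated objective: simpler
-- what changed: B computes the set of edge-referenced keys in one pass and filters nodes.items() positively, instead of A's pruning a copy down to the orphan complement and then deleting those orphans from a second copy.
import Mathlib
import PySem

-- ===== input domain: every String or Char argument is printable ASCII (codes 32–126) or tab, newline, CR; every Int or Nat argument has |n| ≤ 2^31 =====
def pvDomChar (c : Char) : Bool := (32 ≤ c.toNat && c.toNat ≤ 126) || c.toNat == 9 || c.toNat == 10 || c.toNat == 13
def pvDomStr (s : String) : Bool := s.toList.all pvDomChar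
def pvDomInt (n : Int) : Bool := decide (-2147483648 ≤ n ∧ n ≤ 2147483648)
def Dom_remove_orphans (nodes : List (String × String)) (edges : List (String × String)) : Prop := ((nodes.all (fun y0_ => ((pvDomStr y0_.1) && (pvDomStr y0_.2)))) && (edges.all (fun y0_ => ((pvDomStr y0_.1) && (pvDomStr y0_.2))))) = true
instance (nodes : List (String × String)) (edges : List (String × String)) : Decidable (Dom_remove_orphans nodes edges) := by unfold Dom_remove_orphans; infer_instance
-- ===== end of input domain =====

-- B builds the set of edge-referenced keys in one pass and filters the nodes positively,
-- instead of A's pruning a copy down to the orphans and then deleting those from a second copy (simpler decomposition).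


-- ===== PORT A =====
-- 'if edge[i] in remaining_nodes: del remaining_nodes[edge[i]]' on the association-list dict
def pvDelIfIn (l : List (String × String)) (k : String) : List (String × String) :=
  if l.any (fun p => p.1 == k) then l.filter (fun p => p.1 != k) else l

def remove_orphans (nodes : List (String × String)) (edges : List (String × String)) : List (String × String) :=
  let remaining_nodes := edges.foldl (fun rem edge => pvDelIfIn (pvDelIfIn rem edge.1) edge.2) nodes
  remaining_nodes.foldl (fun result orphan => result.filter (fun q => q.1 != orphan.1)) nodes

-- ===== PORT B =====
def remove_orphans_alt (nodes : List (String × String)) (edges : List (String × String)) : List (String × String) :=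
  let referenced : PySem.Set String :=
    edges.foldl (fun s edge => PySem.Set.add (PySem.Set.add s edge.1) edge.2) PySem.Set.empty
  nodes.filter (fun kv => PySem.Set.contains referenced kv.1)

-- ===== PRECONDITION & SPEC =====
def Spec_remove_orphans (nodes : List (String × String)) (edges : List (String × String)) (out : List (String × String)) : Prop := out = remove_orphans_alt nodes edges
instance (nodes : List (String × String)) (edges : List (String × String)) (out : List (String × String)) : Decidable (Spec_remove_orphans nodes edges out) := by unfold Spec_remove_orphans; infer_instance

-- ===== CLAIM (what is proved, stated in full; the proofs are below) =====
def Claim_equal_remove_orphans : Prop := ∀ (nodes : List (String × String)) (edges : List (String × String)), Dom_remove_orphans nodes edges → Spec_remove_orphans nodes edges (remove_orphans nodes edges)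

-- ===== LEMMAS AND PROOFS =====

-- membership in B's referenced-set fold: an endpoint of some edge (or already in s)
lemma mem_refFold (edges : List (String × String)) (s : PySem.Set String) (x : String) :
    x ∈ edges.foldl (fun s edge => PySem.Set.add (PySem.Set.add s edge.1) edge.2) s
      ↔ x ∈ s ∨ ∃ e ∈ edges, x = e.1 ∨ x = e.2 := by
  induction edges generalizing s with
  | nil => simp
  | cons e t ih =>
      simp only [List.foldl_cons, ih, PySem.Set.mem_add, List.mem_cons]
      constructor
      · rintro (((h | h) | h) | ⟨f, hf, h⟩)
        · exact Or.inl h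
        · exact Or.inr ⟨e, Or.inl rfl, Or.inl h⟩
        · exact Or.inr ⟨e, Or.inl rfl, Or.inr h⟩
        · exact Or.inr ⟨f, Or.inr hf, h⟩
      · rintro (h | ⟨f, (rfl | hf), h⟩)
        · exact Or.inl (Or.inl (Or.inl h))
        · rcases h with h | h
          · exact Or.inl (Or.inl (Or.inr h))
          · exact Or.inl (Or.inr h)
        · exact Or.inr ⟨f, hf, h⟩

-- the guarded delete is a filter (the guard only skips a no-op)
lemma pvDelIfIn_eq (l : List (String × String)) (k : String) :
    pvDelIfIn l k = l.filter (fun p => p.1 != k) := by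
  unfold pvDelIfIn
  split_ifs with h
  · rfl
  · symm
    apply List.filter_eq_self.mpr
    intro p hp
    simp only [List.any_eq_true, not_exists, not_and] at h
    have hk : (p.1 == k) ≠ true := fun hc => h p hp hc
    cases hb : (p.1 == k) with
    | false => simp [bne, hb]
    | true => exact absurd hb hk

-- A's pruning loop removes exactly the edge-referenced keys
lemma remFold (edges : List (String × String)) (nodes : List (String × String)) :
    edges.foldl (fun rem edge => pvDelIfIn (pvDelIfIn rem edge.1) edge.2) nodes
      = nodes.filter (fun p => !(edges.any (fun e => p.1 == e.1 || p.1 == e.2))) := by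
  induction edges generalizing nodes with
  | nil => simp
  | cons e t ih =>
      rw [List.foldl_cons, ih, pvDelIfIn_eq, pvDelIfIn_eq, List.filter_filter, List.filter_filter]
      apply List.filter_congr
      intro x _
      simp only [List.any_cons, bne, Bool.not_or, Bool.and_comm, Bool.and_assoc]

-- A's deletion loop is a filter by "key differs from every orphan key"
lemma delFold (rem acc : List (String × String)) :
    rem.foldl (fun result orphan => result.filter (fun q => q.1 != orphan.1)) acc
      = acc.filter (fun q => rem.all (fun p => q.1 != p.1)) := by
  induction rem generalizing acc with
  | nil => simp
  | cons p t ih => simp [ih, List.filter_filter, List.all_cons, Bool.and_comm]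

-- ===== VERDICT (by name: the statement is the Claim_ definition above) =====
theorem remove_orphans_spec : Claim_equal_remove_orphans := by
  intro nodes edges _
  show remove_orphans nodes edges = remove_orphans_alt nodes edges
  simp only [remove_orphans, remove_orphans_alt]
  rw [remFold, delFold]
  apply List.filter_congr
  intro q hq
  by_cases hE : edges.any (fun e => q.1 == e.1 || q.1 == e.2) = true
  · -- q's key is referenced: both sides are true
    have hmem : q.1 ∈ edges.foldl (fun s edge => PySem.Set.add (PySem.Set.add s edge.1) edge.2) PySem.Set.empty := by
      rw [mem_refFold]
      right
      obtain ⟨e, he, hbe⟩ := List.any_eq_true.mp hE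
      refine ⟨e, he, ?_⟩
      simp only [Bool.or_eq_true, beq_iff_eq] at hbe
      exact hbe
    have hc : PySem.Set.contains (edges.foldl (fun s edge => PySem.Set.add (PySem.Set.add s edge.1) edge.2) PySem.Set.empty) q.1 = true := by
      simpa [PySem.Set.contains, List.contains_iff_mem] using hmem
    rw [hc, List.all_eq_true]
    intro p hp
    rcases List.mem_filter.mp hp with ⟨_, hp2⟩
    simp only [Bool.not_eq_true', List.any_eq_false] at hp2
    simp only [bne_iff_ne, ne_eq]
    intro hqp
    obtain ⟨e, he, hbe⟩ := List.any_eq_true.mp hE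
    have := hp2 e he
    rw [← hqp] at this
    simp [hbe] at this
  · -- q's key is not referenced: both sides are false
    have hE' : edges.any (fun e => q.1 == e.1 || q.1 == e.2) = false := Bool.not_eq_true _ |>.mp hE
    have hnm : q.1 ∉ edges.foldl (fun s edge => PySem.Set.add (PySem.Set.add s edge.1) edge.2) PySem.Set.empty := by
      rw [mem_refFold]
      rintro (h | ⟨e, he, h⟩)
      · simp [PySem.Set.empty] at h
      · have := List.any_eq_false.mp hE' e he
        rcases h with h | h <;> simp [h] at this
    have hc : PySem.Set.contains (edges.foldl (fun s edge => PySem.Set.add (PySem.Set.add s edge.1) edge.2) PySem.Set.empty) q.1 = false := by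
      simp only [PySem.Set.contains]
      exact Bool.not_eq_true _ |>.mp (fun hct => hnm (List.contains_iff_mem.mp hct))
    rw [hc]
    have hqin : q ∈ nodes.filter (fun p => !(edges.any (fun e => p.1 == e.1 || p.1 == e.2))) :=
      List.mem_filter.mpr ⟨hq, by simp [hE']⟩
    apply Bool.not_eq_true _ |>.mp
    intro hall
    have := List.all_eq_true.mp hall q hqin
    simp at this
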